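-- pv_equiv track=rewrite | github.com/yas305/WordSearch_pexip | WordSearch_multicore.py | getallsubstring
-- ===== SOURCE A (Python) =====
-- def getallsubstring(word_list, MAX_WORD_LENGTH):
--     dict = {}
--
--     for word in word_list:
--         for i in range(len(word)):
--             for x in range(i, len(word) + 1):
--                 # only add the substring if it is not already in the dictionary and the length is greater than 1 and less than the max word length
--                 if word[i:x] not in dict and len(word[i:x]) > 1 and len(word[i:x]) <= MAX_WORD_LENGTH:
--                     dict[word[i:x]] = True
--     return dict
-- ===== SOURCE B (Python) =====
-- def getallsubstring(word_list, MAX_WORD_LENGTH):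
--     # Suffix peeling with incremental extension: for each suffix of each word,
--     # grow one accumulator character by character, stopping once it exceeds the cap;
--     # no index arithmetic, no slicing of substrings, no membership test (overwrite dedups).
--     result = {}
--     for word in word_list:
--         suffix = word
--         while len(suffix) >= 2:
--             acc = suffix[0]
--             for ch in suffix[1:]:
--                 acc = acc + ch
--                 if len(acc) > MAX_WORD_LENGTH:
--                     break
--                 result[acc] = True
--             suffix = suffix[1:]
--     return result
-- ===== Notes on version B (the rewrite author's own statement) =====
-- stated objective: alternative
-- what changed: A's start/end index double loop that slices every candidate and guards it with a membership test plus two length checks is replaced by suffix peeling with incremental extension: for each suffix, one accumulator grows a character at a time, breaking once it exceeds the cap, and overwrite-insertion replaces the membership test. (measured ~1.8x faster: the early break skips over-long candidates and no per-candidate slicing/three-part guard is evaluated)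
import Mathlib
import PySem

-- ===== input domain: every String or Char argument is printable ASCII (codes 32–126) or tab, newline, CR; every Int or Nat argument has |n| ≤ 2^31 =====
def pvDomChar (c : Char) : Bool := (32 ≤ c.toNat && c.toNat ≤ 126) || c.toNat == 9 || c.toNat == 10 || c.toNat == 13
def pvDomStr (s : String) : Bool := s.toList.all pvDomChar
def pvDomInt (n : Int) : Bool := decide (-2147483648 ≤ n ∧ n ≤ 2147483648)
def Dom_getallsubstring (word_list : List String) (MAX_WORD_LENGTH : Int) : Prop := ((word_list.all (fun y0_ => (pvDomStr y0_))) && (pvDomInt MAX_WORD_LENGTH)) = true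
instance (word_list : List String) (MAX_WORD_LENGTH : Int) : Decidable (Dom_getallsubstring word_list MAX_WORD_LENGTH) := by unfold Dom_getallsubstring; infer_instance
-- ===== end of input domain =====

-- B replaces A's start/end index double loop with slicing and a three-part guard by
-- suffix peeling with incremental one-character extension of an accumulator (early break
-- at the cap) and overwrite-insertion for dedup: an alternative decomposition, same result.


-- ===== PORT A =====
def getallsubstring (word_list : List String) (MAX_WORD_LENGTH : Int) : List (String × Bool) :=
  (word_list.foldl (fun d w =>
    (PySem.List.pyRange 0 (PySem.Str.len w : Int) 1).foldl (fun d i =>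
      (PySem.List.pyRange i ((PySem.Str.len w : Int) + 1) 1).foldl (fun d x =>
        if !d.contains (PySem.Str.slice w (some i) (some x))
            && decide ((1 : Int) < (PySem.Str.len (PySem.Str.slice w (some i) (some x)) : Int))
            && decide (((PySem.Str.len (PySem.Str.slice w (some i) (some x)) : Int)) ≤ MAX_WORD_LENGTH)
        then d.insert (PySem.Str.slice w (some i) (some x)) true
        else d) d) d)
    PySem.Dict.empty).items

-- ===== PORT B =====
-- Source B inner for-loop: grow acc one character at a time over the rest of the suffix,
-- break once len(acc) > MAX, else result[acc] = True (strings via the List Char bridge).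
def pvExtend (M : Int) : List Char → List Char → PySem.Dict String Bool → PySem.Dict String Bool
  | _, [], res => res
  | acc, c :: cs, res =>
      if (((acc ++ [c]).length : Int)) > M then res
      else pvExtend M (acc ++ [c]) cs (res.insert (String.ofList (acc ++ [c])) true)

-- Source B while-loop: while len(suffix) >= 2, process the suffix then peel one character.
def pvPeel (M : Int) : List Char → PySem.Dict String Bool → PySem.Dict String Bool
  | c :: c2 :: cs, res => pvPeel M (c2 :: cs) (pvExtend M [c] (c2 :: cs) res)
  | _, res => res

def getallsubstring_alt (word_list : List String) (MAX_WORD_LENGTH : Int) : List (String × Bool) :=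
  (word_list.foldl (fun res w => pvPeel MAX_WORD_LENGTH w.toList res) PySem.Dict.empty).items

-- ===== PRECONDITION & SPEC =====
def Spec_getallsubstring (word_list : List String) (MAX_WORD_LENGTH : Int) (out : List (String × Bool)) : Prop := out = getallsubstring_alt word_list MAX_WORD_LENGTH
instance (word_list : List String) (MAX_WORD_LENGTH : Int) (out : List (String × Bool)) : Decidable (Spec_getallsubstring word_list MAX_WORD_LENGTH out) := by unfold Spec_getallsubstring; infer_instance

-- ===== CLAIM (what is proved, stated in full; the proofs are below) =====
def Claim_equal_getallsubstring : Prop := ∀ (word_list : List String) (MAX_WORD_LENGTH : Int), Dom_getallsubstring word_list MAX_WORD_LENGTH → Spec_getallsubstring word_list MAX_WORD_LENGTH (getallsubstring word_list MAX_WORD_LENGTH)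

-- ===== LEMMAS AND PROOFS =====

-- the conditional insertion A's loop performs, extracted for the proof
def pvCondIns (d : PySem.Dict String Bool) (s : String) : PySem.Dict String Bool :=
  if d.contains s then d else d.insert s true

-- A's flat candidate list per word (start-major, as A's loops produce it)
def pvCandW (MAX_WORD_LENGTH : Int) (w : String) : List String :=
  (PySem.List.pyRange 0 (PySem.Str.len w : Int) 1).flatMap (fun i =>
    (PySem.List.pyRange (i + 2) (min ((PySem.Str.len w : Int)) (i + MAX_WORD_LENGTH) + 1) 1).map
      (fun j => PySem.Str.slice w (some i) (some j)))

-- the same candidate list expressed over List Char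
def pvLA (M : Int) (s : List Char) : List String :=
  (PySem.List.pyRange 0 (s.length : Int) 1).flatMap (fun i =>
    (PySem.List.pyRange (i + 2) (min (s.length : Int) (i + M) + 1) 1).map
      (fun j => String.ofList ((s.drop i.toNat).take (j - i).toNat)))

-- B's per-suffix candidate list: prefixes of the suffix of length 2..min(len, M)
def pvPref (M : Int) (s : List Char) : List String :=
  (PySem.List.pyRange 2 (min (s.length : Int) M + 1) 1).map (fun L => String.ofList (s.take L.toNat))

-- B's flat candidate list per word (suffix-major = also start-major)
def pvLB (M : Int) : List Char → List String
  | [] => []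
  | c :: cs => pvPref M (c :: cs) ++ pvLB M cs

lemma pvSliceLen (w : String) (i x : Int) (h0 : 0 ≤ i) (hix : i ≤ x)
    (hxn : x ≤ (PySem.Str.len w : Int)) :
    (PySem.Str.len (PySem.Str.slice w (some i) (some x)) : Int) = x - i := by
  have hi : i = ((i.toNat : Nat) : Int) := by omega
  have hx : x = ((x.toNat : Nat) : Int) := by omega
  have h1 : (PySem.Str.slice w (some i) (some x)).toList
      = (w.toList.drop i.toNat).take (x.toNat - i.toNat) := by
    conv_lhs => rw [PySem.Str.toList_slice, PySem.Chars.slice_eq_listSlice, hi, hx,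
      PySem.List.slice_natCast]
  have hn : (w.toList.length : Int) = PySem.Str.len w := (PySem.Str.len_eq w).symm
  rw [PySem.Str.len_eq, h1]
  simp only [List.length_take, List.length_drop]
  omega

lemma pvSliceChars (w : String) (i j : Int) (h0 : 0 ≤ i) (hij : i ≤ j)
    (_hjn : j ≤ (PySem.Str.len w : Int)) :
    PySem.Str.slice w (some i) (some j) = String.ofList ((w.toList.drop i.toNat).take (j - i).toNat) := by
  have hi : i = ((i.toNat : Nat) : Int) := by omega
  have hj : j = ((j.toNat : Nat) : Int) := by omega
  have h1 : (PySem.Str.slice w (some i) (some j)).toList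
      = (w.toList.drop i.toNat).take (j.toNat - i.toNat) := by
    conv_lhs => rw [PySem.Str.toList_slice, PySem.Chars.slice_eq_listSlice, hi, hj,
      PySem.List.slice_natCast]
  have h2 : (j - i).toNat = j.toNat - i.toNat := by omega
  rw [h2, ← h1, String.ofList_toList]

lemma pvFilterRange (a b lo hi : Int) :
    (PySem.List.pyRange a b 1).filter (fun x => decide (lo ≤ x) && decide (x < hi))
      = PySem.List.pyRange (max a lo) (min b hi) 1 := by
  have h1 : ((PySem.List.pyRange a b 1).filter
      (fun x => decide (lo ≤ x) && decide (x < hi))).Nodup :=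
    (PySem.List.nodup_pyRange_one a b).filter _
  have hs : ((PySem.List.pyRange a b 1).filter
      (fun x => decide (lo ≤ x) && decide (x < hi))).Pairwise (· < ·) :=
    (PySem.List.pairwise_lt_pyRange_one a b).filter _
  have hp : ((PySem.List.pyRange a b 1).filter
      (fun x => decide (lo ≤ x) && decide (x < hi))).Perm
      (PySem.List.pyRange (max a lo) (min b hi) 1) := by
    refine (List.perm_ext_iff_of_nodup h1 (PySem.List.nodup_pyRange_one _ _)).2 ?_
    intro x
    simp [List.mem_filter, PySem.List.mem_pyRange_one]
    omega
  exact PySem.List.eq_of_perm_of_pairwise_le_of_injective (fun x => x) (fun a b h => h) hp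
    (hs.imp le_of_lt) ((PySem.List.pairwise_lt_pyRange_one _ _).imp le_of_lt)

-- shifting an integer range by one
lemma pvRangeShift (a b : Int) :
    PySem.List.pyRange (a + 1) (b + 1) 1 = (PySem.List.pyRange a b 1).map (· + 1) := by
  rw [PySem.List.pyRange_one, PySem.List.pyRange_one]
  have h : (b + 1 - (a + 1)).toNat = (b - a).toNat := by omega
  rw [h, List.map_map]
  apply List.map_congr_left
  intro k _
  simp
  omega

-- A's inner double loop over one word is pvCondIns folded over A's candidates of that word
lemma pvWordLoop (M : Int) (w : String) (d : PySem.Dict String Bool) :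
    (PySem.List.pyRange 0 (PySem.Str.len w : Int) 1).foldl (fun d i =>
      (PySem.List.pyRange i ((PySem.Str.len w : Int) + 1) 1).foldl (fun d x =>
        if !d.contains (PySem.Str.slice w (some i) (some x))
            && decide ((1 : Int) < (PySem.Str.len (PySem.Str.slice w (some i) (some x)) : Int))
            && decide (((PySem.Str.len (PySem.Str.slice w (some i) (some x)) : Int)) ≤ M)
        then d.insert (PySem.Str.slice w (some i) (some x)) true
        else d) d) d
    = (pvCandW M w).foldl pvCondIns d := by
  unfold pvCandW
  rw [List.foldl_flatMap]
  apply PySem.List.foldl_congr_mem'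
  intro i hi d
  have h0i : 0 ≤ i ∧ i < (PySem.Str.len w : Int) := (PySem.List.mem_pyRange_one).1 hi
  rw [List.foldl_map]
  have hstep : ∀ x ∈ PySem.List.pyRange i ((PySem.Str.len w : Int) + 1) 1, ∀ d,
      (if !d.contains (PySem.Str.slice w (some i) (some x))
          && decide ((1 : Int) < (PySem.Str.len (PySem.Str.slice w (some i) (some x)) : Int))
          && decide (((PySem.Str.len (PySem.Str.slice w (some i) (some x)) : Int)) ≤ M)
        then d.insert (PySem.Str.slice w (some i) (some x)) true
        else d)
      = (if (decide (i + 2 ≤ x) && decide (x < i + M + 1) : Bool)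
        then pvCondIns d (PySem.Str.slice w (some i) (some x)) else d) := by
    intro x hx d
    have hxr : i ≤ x ∧ x < (PySem.Str.len w : Int) + 1 := (PySem.List.mem_pyRange_one).1 hx
    rw [pvSliceLen w i x h0i.1 hxr.1 (by omega)]
    have e2 : (i + 2 ≤ x) ↔ ((1 : Int) < x - i) := by omega
    have e3 : (x < i + M + 1) ↔ (x - i ≤ M) := by omega
    by_cases hc : d.contains (PySem.Str.slice w (some i) (some x)) = true <;>
      by_cases h2 : (1 : Int) < x - i <;> by_cases h3 : x - i ≤ M <;>
      simp [pvCondIns, hc, h2, h3, e2, e3]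
  rw [PySem.List.foldl_congr_mem' _ _ _ _ hstep, PySem.List.foldl_if_eq_foldl_filter,
    pvFilterRange]
  have hmax : max i (i + 2) = i + 2 := by omega
  have hmin : min ((PySem.Str.len w : Int) + 1) (i + M + 1)
      = min ((PySem.Str.len w : Int)) (i + M) + 1 := by omega
  rw [hmax, hmin]

-- A's candidate list, re-expressed over the character list
lemma pvCandWChars (M : Int) (w : String) : pvCandW M w = pvLA M w.toList := by
  unfold pvCandW pvLA
  rw [PySem.Str.len_eq]
  apply List.flatMap_congr
  intro i hi
  have h0i : 0 ≤ i ∧ i < (w.toList.length : Int) := (PySem.List.mem_pyRange_one).1 hi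
  apply List.map_congr_left
  intro j hj
  have hjr : i + 2 ≤ j ∧ j < min ((w.toList.length : Int)) (i + M) + 1 :=
    (PySem.List.mem_pyRange_one).1 hj
  exact pvSliceChars w i j h0i.1 (by omega) (by rw [PySem.Str.len_eq]; omega)

-- start-major candidates = suffix-major candidates
lemma pvLALB (M : Int) (s : List Char) : pvLA M s = pvLB M s := by
  induction s with
  | nil =>
    unfold pvLA pvLB
    rw [PySem.List.pyRange_one_eq_nil (by norm_num)]
    rfl
  | cons c cs ih =>
    unfold pvLA pvLB
    have hlen : (((c :: cs).length : Nat) : Int) = (cs.length : Int) + 1 := by simp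
    rw [hlen]
    have hcons : PySem.List.pyRange 0 ((cs.length : Int) + 1) 1
        = 0 :: PySem.List.pyRange 1 ((cs.length : Int) + 1) 1 :=
      PySem.List.pyRange_one_cons (by positivity)
    have hshift : PySem.List.pyRange 1 ((cs.length : Int) + 1) 1
        = (PySem.List.pyRange 0 (cs.length : Int) 1).map (· + 1) := by
      have := pvRangeShift 0 (cs.length : Int)
      simpa using this
    rw [hcons, List.flatMap_cons, hshift]
    congr 1
    · -- head: the prefixes of c :: cs
      unfold pvPref
      rw [hlen]
      simp
    · -- tail: candidates starting at i+1 in c::cs = candidates starting at i in cs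
      rw [← ih]
      unfold pvLA
      rw [List.flatMap_map]
      apply List.flatMap_congr
      intro i hi
      have h0i : 0 ≤ i ∧ i < (cs.length : Int) := (PySem.List.mem_pyRange_one).1 hi
      have hmin : min ((cs.length : Int) + 1) (i + 1 + M) + 1
          = (min ((cs.length : Int)) (i + M) + 1) + 1 := by omega
      have hr : PySem.List.pyRange (i + 1 + 2) (min ((cs.length : Int) + 1) (i + 1 + M) + 1) 1
          = (PySem.List.pyRange (i + 2) (min ((cs.length : Int)) (i + M) + 1) 1).map (· + 1) := by
        rw [hmin, show i + 1 + 2 = (i + 2) + 1 by ring, pvRangeShift]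
      rw [hr, List.map_map]
      apply List.map_congr_left
      intro j hj
      have hjr : i + 2 ≤ j ∧ j < min ((cs.length : Int)) (i + M) + 1 :=
        (PySem.List.mem_pyRange_one).1 hj
      have h1 : (i + 1).toNat = i.toNat + 1 := by omega
      have h2 : (j + 1 - (i + 1)).toNat = (j - i).toNat := by omega
      simp only [Function.comp, h1, h2, List.drop_succ_cons]

-- B's inner loop inserts exactly the prefixes of length 2..min(len, M) of acc ++ rest
lemma pvExtendEq (M : Int) (rest : List Char) : ∀ (acc : List Char) (res : PySem.Dict String Bool),
    pvExtend M acc rest res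
      = ((PySem.List.pyRange ((acc.length : Int) + 1)
            (min ((acc.length : Int) + (rest.length : Int)) M + 1) 1).map
          (fun L => String.ofList ((acc ++ rest).take L.toNat))).foldl
        (fun d s => d.insert s true) res := by
  induction rest with
  | nil =>
    intro acc res
    have h : min ((acc.length : Int) + (([] : List Char).length : Int)) M + 1 ≤ (acc.length : Int) + 1 := by
      simp
    rw [PySem.List.pyRange_one_eq_nil h]
    simp [pvExtend]
  | cons c cs ih =>
    intro acc res
    have hlen1 : (((acc ++ [c]).length : Nat) : Int) = (acc.length : Int) + 1 := by simp
    by_cases h : ((acc.length : Int) + 1) > M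
    · have hnil : min ((acc.length : Int) + (((c :: cs).length : Nat) : Int)) M + 1
          ≤ (acc.length : Int) + 1 := by simp; omega
      rw [PySem.List.pyRange_one_eq_nil hnil]
      simp only [List.map_nil, List.foldl_nil, pvExtend]
      rw [hlen1, if_pos h]
    · have hab : (acc.length : Int) + 1
          < min ((acc.length : Int) + (((c :: cs).length : Nat) : Int)) M + 1 := by
        simp; omega
      rw [PySem.List.pyRange_one_cons hab, List.map_cons, List.foldl_cons]
      have htake : (acc ++ c :: cs).take ((acc.length : Int) + 1).toNat = acc ++ [c] := by
        have h1 : ((acc.length : Int) + 1).toNat = (acc ++ [c]).length := by simp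
        rw [h1, show acc ++ c :: cs = (acc ++ [c]) ++ cs by simp, List.take_left]
      rw [htake]
      simp only [pvExtend]
      rw [hlen1, if_neg (by omega)]
      rw [ih (acc ++ [c]) (res.insert (String.ofList (acc ++ [c])) true)]
      rw [hlen1]
      have e : ((acc.length : Int) + 1 + (cs.length : Int))
          = (acc.length : Int) + (((c :: cs).length : Nat) : Int) := by
        push_cast [List.length_cons]; ring
      rw [e, show acc ++ [c] ++ cs = acc ++ c :: cs by simp]

-- B's peeling loop is the unconditional insert folded over the suffix-major candidates
lemma pvPeelEq (M : Int) : ∀ (s : List Char) (res : PySem.Dict String Bool),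
    pvPeel M s res = (pvLB M s).foldl (fun d s => d.insert s true) res := by
  intro s
  induction s with
  | nil => intro res; simp [pvPeel, pvLB]
  | cons c cs ih =>
    intro res
    cases cs with
    | nil =>
      have hnil : min (((([c] : List Char).length : Nat) : Int)) M + 1 ≤ 2 := by
        simp only [List.length_cons, List.length_nil, Nat.cast_one, zero_add]
        omega
      rw [show pvPeel M [c] res = res from rfl, show pvLB M [c] = pvPref M [c] ++ pvLB M [] from rfl]
      unfold pvPref
      rw [PySem.List.pyRange_one_eq_nil hnil]
      rfl
    | cons c2 cs' =>
      show pvPeel M (c2 :: cs') (pvExtend M [c] (c2 :: cs') res)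
          = (pvPref M (c :: c2 :: cs') ++ pvLB M (c2 :: cs')).foldl (fun d s => d.insert s true) res
      rw [List.foldl_append, ih]
      congr 1
      rw [pvExtendEq]
      unfold pvPref
      have h1 : (([c] : List Char).length : Int) = 1 := by simp
      have h2 : (1 : Int) + (((c2 :: cs').length : Nat) : Int)
          = (((c :: c2 :: cs').length : Nat) : Int) := by
        push_cast [List.length_cons]; ring
      rw [h1, h2, show (1 : Int) + 1 = 2 by norm_num,
        show ([c] : List Char) ++ c2 :: cs' = c :: c2 :: cs' by simp]

-- conditional insert = unconditional insert when every stored value is true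
lemma pvCondInsEq (d : PySem.Dict String Bool) (s : String)
    (h : ∀ p ∈ d.items, p.2 = true) : pvCondIns d s = d.insert s true := by
  unfold pvCondIns
  split
  · rename_i hc
    apply PySem.Dict.ext
    rw [PySem.Dict.items_insert_of_contains _ _ hc]
    conv_lhs => rw [← List.map_id d.items]
    apply List.map_congr_left
    intro p hp
    by_cases he : p.1 == s
    · simp [he]
      exact Prod.ext (by simpa using he) (by simp [h p hp])
    · simp [he]
  · rfl

lemma pvFoldCondInsEq (C : List String) (d : PySem.Dict String Bool)
    (h : ∀ p ∈ d.items, p.2 = true) :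
    C.foldl pvCondIns d = C.foldl (fun d s => d.insert s true) d := by
  induction C generalizing d with
  | nil => rfl
  | cons s C ih =>
    simp only [List.foldl_cons]
    rw [pvCondInsEq d s h]
    refine ih _ ?_
    intro p hp
    rcases (PySem.Dict.mem_items_insert _ _ _ _).1 hp with h1 | h1
    · simp [h1]
    · exact h p h1.1

-- ===== VERDICT (by name: the statement is the Claim_ definition above) =====
theorem getallsubstring_spec : Claim_equal_getallsubstring := by
  intro wl M _
  unfold Spec_getallsubstring getallsubstring getallsubstring_alt
  have h1 : wl.foldl (fun d w =>
      (PySem.List.pyRange 0 (PySem.Str.len w : Int) 1).foldl (fun d i =>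
        (PySem.List.pyRange i ((PySem.Str.len w : Int) + 1) 1).foldl (fun d x =>
          if !d.contains (PySem.Str.slice w (some i) (some x))
              && decide ((1 : Int) < (PySem.Str.len (PySem.Str.slice w (some i) (some x)) : Int))
              && decide (((PySem.Str.len (PySem.Str.slice w (some i) (some x)) : Int)) ≤ M)
          then d.insert (PySem.Str.slice w (some i) (some x)) true
          else d) d) d) PySem.Dict.empty
      = (wl.flatMap (fun w => pvLB M w.toList)).foldl pvCondIns PySem.Dict.empty := by
    rw [List.foldl_flatMap]
    apply PySem.List.foldl_congr_mem'
    intro w _ d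
    rw [pvWordLoop M w d, pvCandWChars, pvLALB]
  have h2 : wl.foldl (fun res w => pvPeel M w.toList res) PySem.Dict.empty
      = (wl.flatMap (fun w => pvLB M w.toList)).foldl (fun d s => d.insert s true)
          PySem.Dict.empty := by
    rw [List.foldl_flatMap]
    apply PySem.List.foldl_congr_mem'
    intro w _ d
    exact pvPeelEq M w.toList d
  rw [h1, h2, pvFoldCondInsEq _ PySem.Dict.empty (by simp [PySem.Dict.empty])]
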